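-- pv_equiv track=rewrite | github.com/miya256/atcoder_lib_py | library/number/tools/radix_conversion.py | convert_radix
-- ===== SOURCE A (Python) =====
-- def convert_radix(n: int, radix: int) -> list[int]:
--     """
--     nをradix進数にする
--     radixが負でもok
--     res[i] が radix ^ i の位
--     """
--     assert abs(radix) > 1
--     if n == 0:
--         return [0]
--     is_neg_radix = (radix < 0)
--     radix = abs(radix)
--     res = []
--     while n:
--         res.append(n % radix)
--         n //= radix
--         if is_neg_radix:
--             n = -n
--     return res
-- ===== SOURCE B (Python) =====
-- def convert_radix(n: int, radix: int) -> list[int]: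
--     """Radix-squared conversion: extract TWO digits per iteration by working in
--     base radix**2 (with a shifted digit set when radix is negative), then strip
--     the single possible trailing zero at the end."""
--     assert abs(radix) > 1
--     if n == 0:
--         return [0]
--     b = abs(radix)
--     b2 = b * b
--     res = []
--     if radix > 0:
--         while n:
--             e = n % b2
--             n //= b2
--             res.append(e % b)
--             res.append(e // b)
--     else:
--         while n:
--             r = n % b2
--             e = r if r < b else r - b2   # e = n (mod b2), e in [b-b2, b-1]
--             n = (n - e) // b2
--             d0 = e % b
--             res.append(d0)
--             res.append((d0 - e) // b)
--     if res[-1] == 0: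
--         res.pop()
--     return res
-- ===== Notes on version B (the rewrite author's own statement) =====
-- stated objective: alternative
-- what changed: B converts in base radix**2, extracting two digits per loop iteration (using a shifted digit set [b-b^2, b-1] for negative radix) and stripping the single possible trailing zero afterwards, instead of A's one-digit-per-iteration division loop with abs(radix) and sign flipping.
import Mathlib
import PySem

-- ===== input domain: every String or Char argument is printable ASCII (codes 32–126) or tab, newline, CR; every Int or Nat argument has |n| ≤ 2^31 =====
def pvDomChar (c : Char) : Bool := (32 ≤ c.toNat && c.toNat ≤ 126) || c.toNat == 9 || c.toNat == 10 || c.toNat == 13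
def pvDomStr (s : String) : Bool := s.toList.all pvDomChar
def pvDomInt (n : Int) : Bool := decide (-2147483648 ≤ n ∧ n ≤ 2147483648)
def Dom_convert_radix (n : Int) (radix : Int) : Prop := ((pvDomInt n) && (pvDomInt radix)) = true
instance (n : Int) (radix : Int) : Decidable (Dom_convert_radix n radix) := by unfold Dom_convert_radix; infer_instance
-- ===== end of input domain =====

-- B extracts TWO digits per loop iteration by working in base radix², then strips the one possible trailing zero (alternative algorithm, same values).

-- ===== PORT A =====
-- A's while-loop as fuel recursion; fuel 2*|n|+2 is enough on every input A terminates on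
def convertLoopA (b : Int) (isNeg : Bool) : Nat → Int → List Int → List Int
  | 0, _, res => res
  | fuel+1, n, res =>
    if n = 0 then res
    else
      convertLoopA b isNeg fuel
        (if isNeg then -(PySem.Int.floordiv n b) else PySem.Int.floordiv n b)
        (res ++ [PySem.Int.mod n b])

def convert_radix (n : Int) (radix : Int) : List Int :=
  if n = 0 then [0]
  else convertLoopA (if radix < 0 then -radix else radix) (decide (radix < 0))
        (2 * n.natAbs + 2) n []

-- ===== PORT B =====
-- positive radix: e = n % b2; n //= b2; append e % b; append e // b
def convertLoopBpos (b b2 : Int) : Nat → Int → List Int → List Int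
  | 0, _, res => res
  | fuel+1, n, res =>
    if n = 0 then res
    else
      let e := PySem.Int.mod n b2
      convertLoopBpos b b2 fuel (PySem.Int.floordiv n b2)
        (res ++ [PySem.Int.mod e b, PySem.Int.floordiv e b])

-- negative radix: r = n % b2; e = r if r < b else r - b2; n = (n - e) // b2; d0 = e % b; append d0; append (d0 - e) // b
def convertLoopBneg (b b2 : Int) : Nat → Int → List Int → List Int
  | 0, _, res => res
  | fuel+1, n, res =>
    if n = 0 then res
    else
      let r := PySem.Int.mod n b2
      let e := if r < b then r else r - b2
      let d0 := PySem.Int.mod e b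
      convertLoopBneg b b2 fuel (PySem.Int.floordiv (n - e) b2)
        (res ++ [d0, PySem.Int.floordiv (d0 - e) b])

def convert_radix_alt (n : Int) (radix : Int) : List Int :=
  if n = 0 then [0]
  else
    let b := if radix < 0 then -radix else radix
    let b2 := b * b
    let res := if 0 < radix then convertLoopBpos b b2 (n.natAbs + 1) n []
               else convertLoopBneg b b2 (n.natAbs + 1) n []
    if res.getLast? = some 0 then res.dropLast else res

-- ===== PRECONDITION & SPEC =====
-- Pre_ excludes |radix| <= 1 (A's assert raises AssertionError) and n < 0 with radix > 0
-- (there A's while-loop never reaches 0 and A diverges; so does B).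
def Pre_convert_radix (n : Int) (radix : Int) : Prop :=
  (radix < -1 ∨ 1 < radix) ∧ (0 < radix → 0 ≤ n)
instance (n : Int) (radix : Int) : Decidable (Pre_convert_radix n radix) := by
  unfold Pre_convert_radix; infer_instance
def pvWitness_convert_radix : Int × Int := (7, -2)

def Spec_convert_radix (n : Int) (radix : Int) (out : List Int) : Prop := out = convert_radix_alt n radix
instance (n : Int) (radix : Int) (out : List Int) : Decidable (Spec_convert_radix n radix out) := by unfold Spec_convert_radix; infer_instance

-- ===== CLAIM (what is proved, stated in full; the proofs are below) =====
def Claim_equal_convert_radix : Prop := ∀ (n : Int) (radix : Int), Dom_convert_radix n radix → Pre_convert_radix n radix → Spec_convert_radix n radix (convert_radix n radix)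

-- ===== LEMMAS AND PROOFS =====

-- floor-division/mod are characterised by the Euclidean inequalities (divisor > 0)
lemma fdiv_mod_unique (b q r n : Int) (hb : 0 < b) (h : n = b * q + r)
    (h0 : 0 ≤ r) (h1 : r < b) :
    PySem.Int.floordiv n b = q ∧ PySem.Int.mod n b = r := by
  have F := PySem.Int.floordiv_mul_add_mod n b
  have hr0 := PySem.Int.mod_nonneg (a := n) (b := b) hb
  have hr1 := PySem.Int.mod_lt (a := n) (b := b) hb
  set Q := PySem.Int.floordiv n b
  set R := PySem.Int.mod n b
  have hk : (Q - q) * b = r - R := by linear_combination F + h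
  have h2 : Q - q ≤ 0 := by
    by_contra hc
    have : 1 * b ≤ (Q - q) * b := mul_le_mul_of_nonneg_right (by omega) (le_of_lt hb)
    omega
  have h3 : 0 ≤ Q - q := by
    by_contra hc
    have : (Q - q) * b ≤ (-1) * b := mul_le_mul_of_nonneg_right (by omega) (le_of_lt hb)
    omega
  have hQq : Q = q := by omega
  rw [hQq] at hk ⊢
  exact ⟨rfl, by omega⟩

lemma fdiv_nonneg' (b n : Int) (hb : 2 ≤ b) (hn : 0 ≤ n) :
    0 ≤ PySem.Int.floordiv n b := by
  have F := PySem.Int.floordiv_mul_add_mod n b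
  have hr1 := PySem.Int.mod_lt (a := n) (b := b) (by omega)
  by_contra hc
  have : PySem.Int.floordiv n b * b ≤ (-1) * b :=
    mul_le_mul_of_nonneg_right (by omega) (by omega)
  omega

lemma loopA_zero (b : Int) (s : Bool) (f : Nat) (res : List Int) :
    convertLoopA b s f 0 res = res := by
  cases f <;> simp [convertLoopA]

lemma loopBpos_zero (b b2 : Int) (f : Nat) (res : List Int) :
    convertLoopBpos b b2 f 0 res = res := by
  cases f <;> simp [convertLoopBpos]

lemma loopBneg_zero (b b2 : Int) (f : Nat) (res : List Int) :
    convertLoopBneg b b2 f 0 res = res := by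
  cases f <;> simp [convertLoopBneg]

-- one POSITIVE-branch B step = two A steps: digits and next state
lemma step_pos (b n : Int) (hb : 2 ≤ b) :
    PySem.Int.mod (PySem.Int.mod n (b*b)) b = PySem.Int.mod n b ∧
    PySem.Int.floordiv (PySem.Int.mod n (b*b)) b = PySem.Int.mod (PySem.Int.floordiv n b) b ∧
    PySem.Int.floordiv n (b*b) = PySem.Int.floordiv (PySem.Int.floordiv n b) b := by
  have hb2 : (0:Int) < b * b := by positivity
  have hbpos : (0:Int) < b := by omega
  have F := PySem.Int.floordiv_mul_add_mod n (b*b)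
  have he0 := PySem.Int.mod_nonneg (a := n) (b := b*b) hb2
  have he1 := PySem.Int.mod_lt (a := n) (b := b*b) hb2
  set k := PySem.Int.floordiv n (b*b) with hk
  set e := PySem.Int.mod n (b*b) with he
  have Fe := PySem.Int.floordiv_mul_add_mod e b
  have hd0 := PySem.Int.mod_nonneg (a := e) (b := b) hbpos
  have hd1 := PySem.Int.mod_lt (a := e) (b := b) hbpos
  set q := PySem.Int.floordiv e b with hq
  set d0 := PySem.Int.mod e b with hd
  have hq0 : 0 ≤ q := by
    by_contra hc
    have : q * b ≤ (-1) * b := mul_le_mul_of_nonneg_right (by omega) (le_of_lt hbpos)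
    omega
  have hq1 : q < b := by
    by_contra hc
    have : b * b ≤ q * b := mul_le_mul_of_nonneg_right (by omega) (le_of_lt hbpos)
    omega
  have h1 : PySem.Int.floordiv n b = b * k + q ∧ PySem.Int.mod n b = d0 := by
    apply fdiv_mod_unique b (b * k + q) d0 n hbpos _ hd0 hd1
    linear_combination -F - Fe
  have h2 : PySem.Int.floordiv (b * k + q) b = k ∧ PySem.Int.mod (b * k + q) b = q := by
    exact fdiv_mod_unique b k q _ hbpos (by ring) hq0 hq1
  refine ⟨by omega, ?_, ?_⟩
  · rw [h1.1, h2.2]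
  · rw [h1.1, h2.1]

-- one NEGATIVE-branch B step = two A steps (with sign flip of the quotient)
lemma step_neg (b n e : Int) (hb : 2 ≤ b)
    (he : e = if PySem.Int.mod n (b*b) < b then PySem.Int.mod n (b*b) else PySem.Int.mod n (b*b) - b*b) :
    PySem.Int.mod e b = PySem.Int.mod n b ∧
    PySem.Int.floordiv (PySem.Int.mod e b - e) b = PySem.Int.mod (-(PySem.Int.floordiv n b)) b ∧
    PySem.Int.floordiv (n - e) (b*b) = -(PySem.Int.floordiv (-(PySem.Int.floordiv n b)) b) := by
  have hb2 : (0:Int) < b * b := by positivity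
  have hbpos : (0:Int) < b := by omega
  have hbb : b ≤ b * b := by nlinarith
  have F := PySem.Int.floordiv_mul_add_mod n (b*b)
  have hr0 := PySem.Int.mod_nonneg (a := n) (b := b*b) hb2
  have hr1 := PySem.Int.mod_lt (a := n) (b := b*b) hb2
  have hebounds : b - b*b ≤ e ∧ e ≤ b - 1 := by
    rw [he]; split_ifs <;> omega
  obtain ⟨K, hK⟩ : ∃ K, n - e = b * b * K := by
    rw [he]; split_ifs
    · exact ⟨PySem.Int.floordiv n (b*b), by linear_combination -F⟩
    · exact ⟨PySem.Int.floordiv n (b*b) + 1, by linear_combination -F⟩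
  have Fe := PySem.Int.floordiv_mul_add_mod e b
  have hd0l := PySem.Int.mod_nonneg (a := e) (b := b) hbpos
  have hd0u := PySem.Int.mod_lt (a := e) (b := b) hbpos
  set qe := PySem.Int.floordiv e b with hqe
  set d0 := PySem.Int.mod e b with hd0
  have hqe0 : qe ≤ 0 := by
    by_contra hc
    have : 1 * b ≤ qe * b := mul_le_mul_of_nonneg_right (by omega) (le_of_lt hbpos)
    omega
  have hqe1 : -b < qe := by
    by_contra hc
    have h' : qe * b ≤ (-b) * b := mul_le_mul_of_nonneg_right (by omega) (le_of_lt hbpos)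
    have hbb2 : (-b) * b = -(b*b) := by ring
    omega
  have h1 : PySem.Int.floordiv n b = b * K + qe ∧ PySem.Int.mod n b = d0 := by
    apply fdiv_mod_unique b (b * K + qe) d0 n hbpos _ hd0l hd0u
    linear_combination hK - Fe
  have h2 : PySem.Int.floordiv (-(b * K + qe)) b = -K ∧ PySem.Int.mod (-(b * K + qe)) b = -qe :=
    fdiv_mod_unique b (-K) (-qe) _ hbpos (by ring) (by omega) (by omega)
  have h3 : PySem.Int.floordiv (d0 - e) b = -qe :=
    (fdiv_mod_unique b (-qe) 0 (d0 - e) hbpos (by linear_combination Fe) le_rfl hbpos).1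
  have h4 : PySem.Int.floordiv (n - e) (b*b) = K :=
    (fdiv_mod_unique (b*b) K 0 (n - e) hb2 (by linear_combination hK) le_rfl hb2).1
  refine ⟨h1.2.symm, ?_, ?_⟩
  · rw [h3, h1.1, h2.2]
  · rw [h4, h1.1, h2.1]; omega

-- B's paired loop with fuel f equals A's loop with fuel 2f, up to one trailing 0
lemma sim_pos (b : Int) (hb : 2 ≤ b) :
    ∀ (f : Nat) (n : Int) (res : List Int),
      convertLoopBpos b (b*b) f n res = convertLoopA b false (2*f) n res ∨
      convertLoopBpos b (b*b) f n res = convertLoopA b false (2*f) n res ++ [0] := by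
  intro f
  induction f with
  | zero => intro n res; left; rfl
  | succ f ih =>
    intro n res
    by_cases hn : n = 0
    · left; rw [hn, loopBpos_zero, loopA_zero]
    · obtain ⟨s1, s2, s3⟩ := step_pos b n hb
      have h2f : 2 * (f + 1) = (2*f + 1) + 1 := by omega
      rw [h2f]
      simp only [convertLoopBpos, convertLoopA, if_neg hn, Bool.false_eq_true, if_false]
      by_cases hn1 : PySem.Int.floordiv n b = 0
      · -- A stops after one step; B appends a trailing zero and stops
        right
        have hz := fdiv_mod_unique b 0 0 0 (by omega) (by ring) le_rfl (by omega)
        rw [s1, s2, s3, hn1, hz.1, hz.2, loopBpos_zero]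
        simp
      · rw [if_neg hn1, s2, s3, s1]
        have hl : res ++ [PySem.Int.mod n b, PySem.Int.mod (PySem.Int.floordiv n b) b]
            = res ++ [PySem.Int.mod n b] ++ [PySem.Int.mod (PySem.Int.floordiv n b) b] := by
          simp
        rw [hl]
        exact ih _ _

lemma sim_neg (b : Int) (hb : 2 ≤ b) :
    ∀ (f : Nat) (n : Int) (res : List Int),
      convertLoopBneg b (b*b) f n res = convertLoopA b true (2*f) n res ∨
      convertLoopBneg b (b*b) f n res = convertLoopA b true (2*f) n res ++ [0] := by
  intro f
  induction f with
  | zero => intro n res; left; rfl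
  | succ f ih =>
    intro n res
    by_cases hn : n = 0
    · left; rw [hn, loopBneg_zero, loopA_zero]
    · obtain ⟨s1, s2, s3⟩ := step_neg b n _ hb rfl
      have h2f : 2 * (f + 1) = (2*f + 1) + 1 := by omega
      rw [h2f]
      simp only [convertLoopBneg, convertLoopA, if_neg hn, if_true]
      by_cases hn1 : -(PySem.Int.floordiv n b) = 0
      · right
        have hz := fdiv_mod_unique b 0 0 0 (by omega) (by ring) le_rfl (by omega)
        rw [s2, s3, s1, hn1, hz.1, hz.2, neg_zero, loopBneg_zero]
        simp
      · rw [if_neg hn1, s2, s3, s1]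
        have hl : res ++ [PySem.Int.mod n b, PySem.Int.mod (-(PySem.Int.floordiv n b)) b]
            = res ++ [PySem.Int.mod n b] ++ [PySem.Int.mod (-(PySem.Int.floordiv n b)) b] := by
          simp
        rw [hl]
        exact ih _ _

-- termination measure for A's loop
def muA (n : Int) : Nat := 2 * n.natAbs + (if n < 0 then 1 else 0)

lemma muA_lt_pos (b n : Int) (hb : 2 ≤ b) (hn : 0 < n) :
    muA (PySem.Int.floordiv n b) < muA n := by
  have F := PySem.Int.floordiv_mul_add_mod n b
  have hr0 := PySem.Int.mod_nonneg (a := n) (b := b) (by omega)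
  have hr1 := PySem.Int.mod_lt (a := n) (b := b) (by omega)
  have hq0 : 0 ≤ PySem.Int.floordiv n b := fdiv_nonneg' b n hb (le_of_lt hn)
  obtain ⟨q, hq⟩ : ∃ q, PySem.Int.floordiv n b = q := ⟨_, rfl⟩
  rw [hq] at F hq0 ⊢
  obtain ⟨r, hr⟩ : ∃ r, PySem.Int.mod n b = r := ⟨_, rfl⟩
  rw [hr] at F hr0 hr1
  have hlin : 2 * q ≤ n := by nlinarith
  unfold muA
  split_ifs <;> omega

lemma muA_neg_lt (b n : Int) (hb : 2 ≤ b) (hn : n ≠ 0) :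
    muA (-(PySem.Int.floordiv n b)) < muA n := by
  have F := PySem.Int.floordiv_mul_add_mod n b
  have hr0 := PySem.Int.mod_nonneg (a := n) (b := b) (by omega)
  have hr1 := PySem.Int.mod_lt (a := n) (b := b) (by omega)
  obtain ⟨q, hq⟩ : ∃ q, PySem.Int.floordiv n b = q := ⟨_, rfl⟩
  rw [hq] at F ⊢
  obtain ⟨r, hr⟩ : ∃ r, PySem.Int.mod n b = r := ⟨_, rfl⟩
  rw [hr] at F hr0 hr1
  by_cases hq0 : 0 ≤ q
  · -- then n ≥ 0
    have hlin : 2 * q ≤ n := by nlinarith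
    have hnn : 0 ≤ n := by nlinarith
    unfold muA
    split_ifs <;> omega
  · have hq1 : q ≤ -1 := by omega
    have hnq : n ≤ q := by nlinarith
    have hneg : n < 0 := by omega
    unfold muA
    split_ifs <;> omega

-- with sufficient fuel and a valid input, A's result never ends in a 0 digit
lemma lastA (b : Int) (s : Bool) (hb : 2 ≤ b) :
    ∀ (f : Nat) (n : Int) (res : List Int), n ≠ 0 → (s = false → 0 ≤ n) → muA n ≤ f →
      (convertLoopA b s f n res).getLast? ≠ some 0 := by
  intro f
  induction f with
  | zero =>
    intro n res hn hv hmu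
    exfalso
    have : n.natAbs ≠ 0 := fun h => hn (Int.natAbs_eq_zero.mp h)
    unfold muA at hmu
    split_ifs at hmu <;> omega
  | succ f ih =>
    intro n res hn hv hmu
    have F := PySem.Int.floordiv_mul_add_mod n b
    simp only [convertLoopA, if_neg hn]
    cases s with
    | false =>
      simp only [Bool.false_eq_true, if_false]
      have hn0 : 0 ≤ n := hv rfl
      by_cases hn1 : PySem.Int.floordiv n b = 0
      · rw [hn1, loopA_zero]
        have hmn : PySem.Int.mod n b = n := by
          rw [hn1] at F; omega
        simp [hmn, hn]
      · refine ih (PySem.Int.floordiv n b) _ hn1 (fun _ => fdiv_nonneg' b n hb hn0) ?_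
        have := muA_lt_pos b n hb (by omega)
        omega
    | true =>
      simp only [if_true]
      by_cases hn1 : -(PySem.Int.floordiv n b) = 0
      · rw [hn1, loopA_zero]
        have hmn : PySem.Int.mod n b = n := by
          have : PySem.Int.floordiv n b = 0 := by omega
          rw [this] at F; omega
        simp [hmn, hn]
      · refine ih (-(PySem.Int.floordiv n b)) _ hn1 (by simp) ?_
        have := muA_neg_lt b n hb hn
        omega

-- ===== VERDICT (by name: the statement is the Claim_ definition above) =====
theorem convert_radix_spec : Claim_equal_convert_radix := by
  intro n radix _ hpre
  obtain ⟨hrad, hvpos⟩ := hpre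
  unfold Spec_convert_radix convert_radix convert_radix_alt
  by_cases hn : n = 0
  · simp [hn]
  · simp only [if_neg hn]
    have hfuel : 2 * (n.natAbs + 1) = 2 * n.natAbs + 2 := by omega
    have hmu : ∀ m : Int, muA m ≤ 2 * m.natAbs + 2 := by
      intro m; unfold muA; split_ifs <;> omega
    rcases lt_trichotomy radix 0 with hneg | h0 | hpos
    · have hb : 2 ≤ -radix := by omega
      have hnpos : ¬ 0 < radix := by omega
      simp only [if_pos hneg, if_neg hnpos, decide_eq_true hneg]
      have hsim := sim_neg (-radix) hb (n.natAbs + 1) n []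
      rw [hfuel] at hsim
      have hlast := lastA (-radix) true hb (2 * n.natAbs + 2) n [] hn (by simp) (hmu n)
      rcases hsim with h | h
      · rw [h, if_neg (fun hc => hlast hc)]
      · rw [h, if_pos (by simp)]
        simp
    · omega
    · have hb : 2 ≤ radix := by omega
      have hnlt : ¬ radix < 0 := by omega
      simp only [if_pos hpos, if_neg hnlt, decide_eq_false hnlt]
      have hsim := sim_pos radix hb (n.natAbs + 1) n []
      rw [hfuel] at hsim
      have hlast := lastA radix false hb (2 * n.natAbs + 2) n [] hn (fun _ => hvpos hpos) (hmu n)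
      rcases hsim with h | h
      · rw [h, if_neg (fun hc => hlast hc)]
      · rw [h, if_pos (by simp)]
        simp
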